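-- pv_equiv track=rewrite | github.com/MrCoft/twocode | twocode/utils/_box.py | redict
-- ===== SOURCE A (Python) =====
-- def redict(d, remove=None, add=None):
--     if remove is None: remove = []
--     if add is None: add = []
--     d = dict(d)
--     for var in remove:
--         if var in d:
--             del d[var]
--     if add:
--         d = {key: d[key] for key in add if key in d}
--     return d
-- ===== SOURCE B (Python) =====
-- def redict(d, remove=None, add=None):
--     src = dict(d)
--     banned = set(remove) if remove else set()
--     out = {}
--     for k in (add if add else src):
--         if not (k in banned) and k in src:
--             out.setdefault(k, src[k])
--     return out
-- ===== Notes on version B (the rewrite author's own statement) =====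
-- stated objective: alternative
-- what changed: A works in two staged mutating phases (copy the dict, delete removed keys in place, then rebuild from add with a comprehension); B never deletes or rebuilds: it plans one unified key order (add, else the dict's own keys) and makes a single accumulation pass that setdefaults kept pairs into a fresh dict.
import Mathlib
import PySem

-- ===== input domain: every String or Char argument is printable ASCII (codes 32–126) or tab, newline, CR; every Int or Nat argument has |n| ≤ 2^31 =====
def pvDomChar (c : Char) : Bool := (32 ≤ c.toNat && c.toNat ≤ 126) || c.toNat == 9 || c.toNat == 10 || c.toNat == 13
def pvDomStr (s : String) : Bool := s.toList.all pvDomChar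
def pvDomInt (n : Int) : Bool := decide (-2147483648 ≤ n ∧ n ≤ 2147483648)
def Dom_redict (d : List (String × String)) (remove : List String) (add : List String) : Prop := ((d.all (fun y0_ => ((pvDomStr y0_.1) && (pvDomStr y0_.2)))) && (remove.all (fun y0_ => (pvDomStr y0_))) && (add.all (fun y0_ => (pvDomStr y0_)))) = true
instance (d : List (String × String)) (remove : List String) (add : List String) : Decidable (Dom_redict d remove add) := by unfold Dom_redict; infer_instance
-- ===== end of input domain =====

-- B replaces A's two staged mutating phases (copy, delete-loop, rebuild-from-add) with one
-- accumulation pass over a unified key order (objective: alternative); return values agree everywhere.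

-- ===== PORT A =====
-- d = dict(d); for var in remove: if var in d: del d[var]; if add: d = {key: d[key] for key in add if key in d}
def redict (d : List (String × String)) (remove : List String) (add : List String) : List (String × String) :=
  let d1 := PySem.Dict.ofList d
  let d2 := remove.foldl (fun dd var => if dd.contains var then dd.erase var else dd) d1
  let d3 := if !add.isEmpty then
      add.foldl (fun acc key =>
        match d2.get? key with    -- 'if key in d' guards the lookup 'd[key]'
        | some v => acc.insert key v
        | none => acc) PySem.Dict.empty
    else d2
  d3.items

-- ===== PORT B =====
-- src = dict(d); banned = set(remove) if remove else set(); out = {};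
-- for k in (add if add else src): if k not in banned and k in src: out.setdefault(k, src[k]); return out
-- ('for k in src' iterates the dict's keys in insertion order; src[k] is ported as getD with
-- an unused default, exact because the 'k in src' guard holds on that branch)
def redict_alt (d : List (String × String)) (remove : List String) (add : List String) : List (String × String) :=
  let src := PySem.Dict.ofList d
  let banned := if !remove.isEmpty then PySem.Set.ofList remove else PySem.Set.empty
  let order := if !add.isEmpty then add else src.keys
  (order.foldl (fun out k =>
      if !(PySem.Set.contains banned k) && src.contains k then
        out.setdefault k (src.getD k "")
      else out) PySem.Dict.empty).items

-- ===== PRECONDITION & SPEC =====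
def Spec_redict (d : List (String × String)) (remove : List String) (add : List String) (out : List (String × String)) : Prop := out = redict_alt d remove add
instance (d : List (String × String)) (remove : List String) (add : List String) (out : List (String × String)) : Decidable (Spec_redict d remove add out) := by unfold Spec_redict; infer_instance

-- ===== CLAIM (what is proved, stated in full; the proofs are below) =====
def Claim_equal_redict : Prop := ∀ (d : List (String × String)) (remove : List String) (add : List String), Dom_redict d remove add → Spec_redict d remove add (redict d remove add)

-- ===== LEMMAS AND PROOFS =====

theorem banned_contains (remove : List String) (k : String) :
    PySem.Set.contains (if !remove.isEmpty then PySem.Set.ofList remove else PySem.Set.empty) k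
      = decide (k ∈ remove) := by
  cases remove with
  | nil => simp [PySem.Set.empty, PySem.Set.contains]
  | cons r rs =>
      simp only [List.isEmpty_cons, Bool.not_false, if_pos]
      by_cases h : k ∈ r :: rs
      · have h1 : k ∈ PySem.Set.ofList (r :: rs) := (PySem.Set.mem_ofList _ k).mpr h
        simp [PySem.Set.contains, h, h1]
      · have h1 : k ∉ PySem.Set.ofList (r :: rs) := fun hc => h ((PySem.Set.mem_ofList _ k).mp hc)
        simp [PySem.Set.contains, h, h1]

-- A's guarded erase loop filters the items list by non-membership in `remove`.
theorem erase_fold_items (remove : List String) (d1 : PySem.Dict String String) :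
    (remove.foldl (fun dd var => if dd.contains var then dd.erase var else dd) d1).items
      = d1.items.filter (fun p => !decide (p.1 ∈ remove)) := by
  induction remove generalizing d1 with
  | nil => simp
  | cons r rs ih =>
      simp only [List.foldl_cons]
      rw [ih]
      have hstep : (if d1.contains r then d1.erase r else d1).items
          = d1.items.filter (fun p => !(p.1 == r)) := by
        by_cases h : d1.contains r = true
        · simp [h, PySem.Dict.erase]
        · have hall : ∀ p ∈ d1.items, (p.1 == r) = false := by
            intro p hp
            by_contra hc
            apply h
            simp only [PySem.Dict.contains, List.any_eq_true]
            exact ⟨p, hp, by simpa using hc⟩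
          simp only [h, Bool.false_eq_true, if_neg, not_false_eq_true]
          symm
          apply List.filter_eq_self.mpr
          intro p hp
          simp [hall p hp]
      rw [hstep, List.filter_filter]
      apply List.filter_congr
      intro p _
      by_cases h1 : p.1 = r <;> by_cases h2 : p.1 ∈ rs <;> simp [h1, h2]

-- get? of the erased dict, in terms of the original dict.
theorem erase_fold_get? (remove : List String) (d1 : PySem.Dict String String) (k : String) :
    (remove.foldl (fun dd var => if dd.contains var then dd.erase var else dd) d1).get? k
      = if k ∈ remove then none else d1.get? k := by
  simp only [PySem.Dict.get?, erase_fold_items]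
  induction d1.items with
  | nil => simp
  | cons p ps ih =>
      by_cases hm : p.1 ∈ remove
      · rw [List.filter_cons, if_neg (by simp [hm])]
        by_cases hpk : p.1 = k
        · have hk : k ∈ remove := hpk ▸ hm
          rw [ih]
          simp [hk]
        · rw [List.find?_cons_of_neg (by simp [hpk])]
          exact ih
      · rw [List.filter_cons, if_pos (by simp [hm])]
        by_cases hpk : p.1 = k
        · have hrk : k ∉ remove := hpk ▸ hm
          rw [if_neg hrk, List.find?_cons_of_pos (l := _) (by simp [hpk]),
              List.find?_cons_of_pos (l := _) (by simp [hpk])]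
        · rw [List.find?_cons_of_neg (by simp [hpk]),
              List.find?_cons_of_neg (by simp [hpk])]
          exact ih

-- Re-inserting a key with the value it already has leaves the dict unchanged.
theorem insert_noop (acc : PySem.Dict String String) (k v : String)
    (hnd : acc.keys.Nodup) (h : acc.get? k = some v) : acc.insert k v = acc := by
  have hc : acc.contains k = true := by
    rw [PySem.Dict.contains_eq_isSome_get?, h]; rfl
  apply PySem.Dict.ext
  rw [PySem.Dict.items_insert_of_contains acc v hc]
  have : ∀ p ∈ acc.items, (if p.1 == k then (k, v) else p) = p := by
    rintro ⟨p1, p2⟩ hp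
    by_cases hpk : p1 = k
    · have h2 : acc.get? p1 = some p2 := PySem.Dict.get?_of_mem_items acc hp hnd
      rw [hpk, h] at h2
      simp [hpk, Option.some_inj.mp h2]
    · simp [hpk]
  rw [List.map_congr_left this]
  exact List.map_id' acc.items

-- B's single accumulation pass over distinct fresh keys appends exactly the kept pairs.
theorem fold_setdefault_items (P : String → Bool) (g : String → String) :
    ∀ (ks : List String) (out : PySem.Dict String String), ks.Nodup → out.keys.Nodup →
    (∀ k ∈ ks, out.contains k = false) →
    (ks.foldl (fun out k => if P k then out.setdefault k (g k) else out) out).items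
      = out.items ++ (ks.filter P).map (fun k => (k, g k)) := by
  intro ks
  induction ks with
  | nil => intro out _ _ _; simp
  | cons k rest ih =>
      intro out hnd hout hdisj
      have hk : out.contains k = false := hdisj k (by simp)
      simp only [List.foldl_cons, List.filter_cons]
      by_cases hP : P k = true
      · rw [if_pos hP, if_pos hP, PySem.Dict.setdefault_of_not_contains out (g k) hk]
        rw [ih (out.insert k (g k)) (List.Nodup.of_cons hnd)
              (PySem.Dict.nodup_keys_insert _ _ _ hout)
              (by
                intro k' hk'
                rw [PySem.Dict.contains_insert]
                have hne : k' ≠ k := by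
                  rintro rfl
                  exact (List.nodup_cons.mp hnd).1 hk'
                simp [hne, hdisj k' (List.mem_cons_of_mem _ hk')])]
        rw [PySem.Dict.items_insert_of_not_contains out (g k) hk]
        simp
      · rw [if_neg hP, if_neg hP]
        exact ih out (List.Nodup.of_cons hnd) hout
          (fun k' hk' => hdisj k' (List.mem_cons_of_mem _ hk'))

-- A's rebuild-from-add loop and B's accumulation pass build the same dict.
theorem fold_insert_eq_setdefault (d1 : PySem.Dict String String) (remove : List String) :
    ∀ (add : List String) (acc : PySem.Dict String String), acc.keys.Nodup →
    (∀ p ∈ acc.items, (if p.1 ∈ remove then none else d1.get? p.1) = some p.2) →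
    add.foldl (fun acc key =>
        match (if key ∈ remove then none else d1.get? key) with
        | some v => acc.insert key v
        | none => acc) acc
      = add.foldl (fun out k =>
          if !(decide (k ∈ remove)) && d1.contains k then
            out.setdefault k (d1.getD k "")
          else out) acc := by
  intro add
  induction add with
  | nil => intro acc _ _; rfl
  | cons k rest ih =>
      intro acc hnd hinv
      simp only [List.foldl_cons]
      by_cases hr : k ∈ remove
      · simp only [hr, if_pos, decide_true, Bool.not_true, Bool.false_and,
          Bool.false_eq_true, if_neg, not_false_eq_true]
        exact ih acc hnd hinv
      · cases h : d1.get? k with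
        | none =>
            have hc : d1.contains k = false := by
              rw [PySem.Dict.contains_eq_isSome_get?, h]; rfl
            simp only [hr, if_neg, not_false_eq_true, decide_false, Bool.not_false,
              Bool.true_and, hc, Bool.false_eq_true]
            exact ih acc hnd hinv
        | some v =>
            have hc : d1.contains k = true := by
              rw [PySem.Dict.contains_eq_isSome_get?, h]; rfl
            have hgd : d1.getD k "" = v := PySem.Dict.getD_of_get?_eq_some d1 "" h
            simp only [hr, if_neg, not_false_eq_true, decide_false, Bool.not_false,
              Bool.true_and, hc, if_pos, hgd]
            by_cases hck : acc.contains k = true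
            · rw [PySem.Dict.setdefault_of_contains acc v hck]
              have hsome : (acc.get? k).isSome := by
                rw [← PySem.Dict.contains_eq_isSome_get?, hck]
              obtain ⟨w, hw⟩ := Option.isSome_iff_exists.mp hsome
              have hmem : (k, w) ∈ acc.items := PySem.Dict.mem_items_of_get?_eq_some acc hw
              have := hinv (k, w) hmem
              rw [if_neg hr, h] at this
              have hwv : v = w := Option.some_inj.mp this
              rw [hwv, insert_noop acc k w hnd hw]
              exact ih acc hnd hinv
            · rw [PySem.Dict.setdefault_of_not_contains acc v (by
                  cases hck2 : acc.contains k
                  · rfl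
                  · exact absurd hck2 hck)]
              refine ih (acc.insert k v) (PySem.Dict.nodup_keys_insert _ _ _ hnd) ?_
              intro p hp
              rcases (PySem.Dict.mem_items_insert _ _ _ _).mp hp with rfl | ⟨hp', _⟩
              · simp [hr, h]
              · exact hinv p hp'

-- ===== VERDICT (by name: the statement is the Claim_ definition above) =====
theorem redict_spec : Claim_equal_redict := by
  intro d remove add _
  show redict d remove add = redict_alt d remove add
  unfold redict redict_alt
  simp only [banned_contains, erase_fold_get?]
  by_cases ha : add.isEmpty
  · simp only [ha, Bool.not_true, Bool.false_eq_true, if_neg, not_false_eq_true]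
    rw [erase_fold_items,
        fold_setdefault_items _ _ _ PySem.Dict.empty
          (PySem.Dict.nodup_keys_ofList d) (by simp) (by simp),
        PySem.Dict.items_eq_map_keys (PySem.Dict.ofList d) (PySem.Dict.nodup_keys_ofList d) "",
        List.filter_map]
    simp only [PySem.Dict.empty, List.nil_append]
    apply congrArg
    apply List.filter_congr
    intro k hk
    have : (PySem.Dict.ofList d).contains k = true :=
      (PySem.Dict.contains_iff_mem_keys _ _).mpr hk
    simp [this, Function.comp]
  · simp only [ha, Bool.not_false, if_pos]
    apply congrArg
    exact fold_insert_eq_setdefault (PySem.Dict.ofList d) remove add PySem.Dict.empty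
      (by simp) (by simp [PySem.Dict.empty])
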